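-- pv_equiv track=rewrite | github.com/felipesantoos/smell-detector | smell_detector/malformed_test.py | malformed_tests_counter
-- ===== SOURCE A (Python) =====
-- def malformed_tests_counter(steps):
--     keyword_counts = {"Given": 0, "When": 0, "Then": 0}
--     for step in steps:
--         if step.startswith("Given"):
--             keyword_counts["Given"] += 1
--         elif step.startswith("When"):
--             keyword_counts["When"] += 1
--         elif step.startswith("Then"):
--             keyword_counts["Then"] += 1
--     return keyword_counts
-- ===== SOURCE B (Python) =====
-- def malformed_tests_counter(steps):
--     # Three independent scans, one per keyword; the prefixes are mutually exclusive.
--     return {kw: sum(1 for s in steps if s.startswith(kw)) for kw in ("Given", "When", "Then")}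
-- ===== Notes on version B (the rewrite author's own statement) =====
-- stated objective: idiomatic
-- what changed: Replaces the single elif-chain pass mutating a counter dict with a dict comprehension over the three fixed keywords, each counted by an independent sum-of-startswith scan (correct because the prefixes are mutually exclusive).
import Mathlib
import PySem

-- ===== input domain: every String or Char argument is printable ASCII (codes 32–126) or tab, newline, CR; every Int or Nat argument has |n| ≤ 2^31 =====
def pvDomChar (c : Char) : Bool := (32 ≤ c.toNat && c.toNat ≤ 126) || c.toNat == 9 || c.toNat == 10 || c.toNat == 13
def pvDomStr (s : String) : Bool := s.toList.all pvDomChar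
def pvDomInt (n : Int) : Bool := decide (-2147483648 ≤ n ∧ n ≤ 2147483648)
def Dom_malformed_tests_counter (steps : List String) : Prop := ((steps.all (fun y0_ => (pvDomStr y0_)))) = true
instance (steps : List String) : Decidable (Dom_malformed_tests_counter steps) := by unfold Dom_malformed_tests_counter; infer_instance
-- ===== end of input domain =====

-- B replaces A's single branching pass over a mutated counter dict with three independent
-- per-keyword counting scans (idiomatic; same asymptotic cost).

-- ===== PORT A =====
def malformed_tests_counter (steps : List String) : List (String × Int) :=
  (steps.foldl (fun d step =>
      if PySem.Str.startswith step "Given" then d.modify "Given" 0 (· + 1)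
      else if PySem.Str.startswith step "When" then d.modify "When" 0 (· + 1)
      else if PySem.Str.startswith step "Then" then d.modify "Then" 0 (· + 1)
      else d)
    (PySem.Dict.ofList [("Given", 0), ("When", 0), ("Then", 0)])).items

-- ===== PORT B =====
def malformed_tests_counter_alt (steps : List String) : List (String × Int) :=
  ["Given", "When", "Then"].map (fun kw =>
    (kw, steps.foldl (fun acc s => if PySem.Str.startswith s kw then acc + 1 else acc) (0 : Int)))

-- ===== PRECONDITION & SPEC =====
def Spec_malformed_tests_counter (steps : List String) (out : List (String × Int)) : Prop := out = malformed_tests_counter_alt steps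
instance (steps : List String) (out : List (String × Int)) : Decidable (Spec_malformed_tests_counter steps out) := by unfold Spec_malformed_tests_counter; infer_instance

-- ===== CLAIM (what is proved, stated in full; the proofs are below) =====
def Claim_equal_malformed_tests_counter : Prop := ∀ (steps : List String), Dom_malformed_tests_counter steps → Spec_malformed_tests_counter steps (malformed_tests_counter steps)

-- ===== LEMMAS AND PROOFS =====

-- one of B's per-keyword scans, named so the invariant can mention it
def pvCnt (kw : String) (steps : List String) : Int :=
  steps.foldl (fun acc s => if PySem.Str.startswith s kw then acc + 1 else acc) (0 : Int)

theorem pvCnt_shift (kw : String) (steps : List String) (a : Int) :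
    steps.foldl (fun acc s => if PySem.Str.startswith s kw then acc + 1 else acc) a
      = a + steps.foldl (fun acc s => if PySem.Str.startswith s kw then acc + 1 else acc) 0 := by
  induction steps generalizing a with
  | nil => simp
  | cons s t ih =>
      rw [List.foldl_cons, List.foldl_cons]
      split_ifs
      · rw [ih (a + 1), ih ((0 : Int) + 1)]; ring
      · rw [ih a]

theorem pvCnt_cons (kw s : String) (t : List String) :
    pvCnt kw (s :: t)
      = (if PySem.Str.startswith s kw then 1 else 0) + pvCnt kw t := by
  unfold pvCnt
  rw [List.foldl_cons, pvCnt_shift]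
  split_ifs <;> ring

-- the three keyword prefixes are mutually exclusive (first characters differ)
theorem pv_excl (s p q : String) (cp : Char) (lp : List Char) (cq : Char) (lq : List Char)
    (hp : p.toList = cp :: lp) (hq : q.toList = cq :: lq) (hne : cp ≠ cq)
    (h : PySem.Str.startswith s p = true) : PySem.Str.startswith s q = false := by
  by_contra hQ
  rw [Bool.not_eq_false] at hQ
  simp only [PySem.Str.startswith_eq, PySem.Chars.startswith_iff] at h hQ
  obtain ⟨u, hu⟩ := h; obtain ⟨v, hv⟩ := hQ
  rw [← hu, hp, hq] at hv
  simp at hv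
  exact hne (hv.1.symm)

theorem pvGl : "Given".toList = ['G','i','v','e','n'] := rfl
theorem pvWl : "When".toList = ['W','h','e','n'] := rfl
theorem pvTl : "Then".toList = ['T','h','e','n'] := rfl

-- loop invariant for A's pass: the dict stays the three-key literal with shifted counts
theorem loopA (steps : List String) (a b c : Int) :
    (steps.foldl (fun d step =>
        if PySem.Str.startswith step "Given" then d.modify "Given" 0 (· + 1)
        else if PySem.Str.startswith step "When" then d.modify "When" 0 (· + 1)
        else if PySem.Str.startswith step "Then" then d.modify "Then" 0 (· + 1)
        else d)
      (PySem.Dict.mk [("Given", a), ("When", b), ("Then", c)])).items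
    = [("Given", a + pvCnt "Given" steps), ("When", b + pvCnt "When" steps),
       ("Then", c + pvCnt "Then" steps)] := by
  induction steps generalizing a b c with
  | nil => simp [pvCnt]
  | cons s t ih =>
      simp only [List.foldl_cons]
      rw [pvCnt_cons, pvCnt_cons, pvCnt_cons]
      by_cases hG : PySem.Str.startswith s "Given" = true
      · have hW := pv_excl s "Given" "When" 'G' ['i','v','e','n'] 'W' ['h','e','n']
          rfl rfl (by decide) hG
        have hT := pv_excl s "Given" "Then" 'G' ['i','v','e','n'] 'T' ['h','e','n']
          rfl rfl (by decide) hG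
        rw [if_pos hG]
        have hm : (PySem.Dict.mk [("Given", a), ("When", b), ("Then", c)]).modify "Given" 0 (· + 1)
            = PySem.Dict.mk [("Given", a + 1), ("When", b), ("Then", c)] := by
          simp [PySem.Dict.modify, PySem.Dict.insert, PySem.Dict.getD, PySem.Dict.get?,
            PySem.Dict.contains]
        rw [hm, ih]
        simp only [PySem.Str.startswith_eq, pvGl, pvWl, pvTl] at hG hW hT
        simp [hG, hW, hT, pvGl, pvWl, pvTl, add_comm, add_left_comm]
      · rw [if_neg hG]
        by_cases hW : PySem.Str.startswith s "When" = true
        · have hT := pv_excl s "When" "Then" 'W' ['h','e','n'] 'T' ['h','e','n']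
            rfl rfl (by decide) hW
          rw [if_pos hW]
          have hm : (PySem.Dict.mk [("Given", a), ("When", b), ("Then", c)]).modify "When" 0 (· + 1)
              = PySem.Dict.mk [("Given", a), ("When", b + 1), ("Then", c)] := by
            simp [PySem.Dict.modify, PySem.Dict.insert, PySem.Dict.getD, PySem.Dict.get?,
              PySem.Dict.contains]
          rw [hm, ih]
          simp only [PySem.Str.startswith_eq, pvGl, pvWl, pvTl] at hG hW hT
          simp [hG, hW, hT, pvGl, pvWl, pvTl, add_comm, add_left_comm]
        · rw [if_neg hW]
          by_cases hT : PySem.Str.startswith s "Then" = true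
          · rw [if_pos hT]
            have hm : (PySem.Dict.mk [("Given", a), ("When", b), ("Then", c)]).modify "Then" 0 (· + 1)
                = PySem.Dict.mk [("Given", a), ("When", b), ("Then", c + 1)] := by
              simp [PySem.Dict.modify, PySem.Dict.insert, PySem.Dict.getD, PySem.Dict.get?,
                PySem.Dict.contains]
            rw [hm, ih]
            simp only [PySem.Str.startswith_eq, pvGl, pvWl, pvTl] at hG hW hT
            simp [hG, hW, hT, pvGl, pvWl, pvTl, add_comm, add_left_comm]
          · rw [if_neg hT, ih]
            simp only [PySem.Str.startswith_eq, pvGl, pvWl, pvTl] at hG hW hT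
            simp [hG, hW, hT, pvGl, pvWl, pvTl]

-- ===== VERDICT (by name: the statement is the Claim_ definition above) =====
theorem malformed_tests_counter_spec : Claim_equal_malformed_tests_counter := by
  intro steps _
  unfold Spec_malformed_tests_counter malformed_tests_counter malformed_tests_counter_alt
  rw [show PySem.Dict.ofList [("Given", (0:Int)), ("When", 0), ("Then", 0)]
      = PySem.Dict.mk [("Given", 0), ("When", 0), ("Then", 0)] from by decide]
  rw [loopA]
  simp [pvCnt]
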